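-- pv_equiv track=rewrite | github.com/Weelhz/Koios | utils/validators.py | _get_parse_suggestions
-- ===== SOURCE A (Python) =====
-- from typing import List, Dict, Any, Union, Optional, Tuple
--
-- def _get_parse_suggestions(expression: str) -> List[str]:
--     """Get suggestions for fixing parse errors"""
--     suggestions = []
--
--     if '*' not in expression and any(c.isdigit() for c in expression) and any(c.isalpha() for c in expression):
--         suggestions.append("Use * for multiplication (e.g., 2*x instead of 2x)")
--
--     if '^' in expression:
--         suggestions.append("Use ** for exponentiation instead of ^")
--
--     if expression.count('(') != expression.count(')'):
--         suggestions.append("Check parentheses balance")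
--
--     if any(op in expression for op in ['++', '--', '**', '//']):
--         suggestions.append("Check for double operators")
--
--     return suggestions
-- ===== SOURCE B (Python) =====
-- def _get_parse_suggestions(expression: str):
--     """Get suggestions for fixing parse errors (single pass over the characters)."""
--     has_digit = has_alpha = has_star = has_caret = has_double = False
--     n_open = n_close = 0
--     prev = None
--     for c in expression:
--         if c.isdigit():
--             has_digit = True
--         if c.isalpha():
--             has_alpha = True
--         if c == '*':
--             has_star = True
--         if c == '^':
--             has_caret = True
--         if c == '(':
--             n_open += 1
--         if c == ')':
--             n_close += 1
--         if prev == c and c in '+-*/':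
--             has_double = True
--         prev = c
--     suggestions = []
--     if not has_star and has_digit and has_alpha:
--         suggestions.append("Use * for multiplication (e.g., 2*x instead of 2x)")
--     if has_caret:
--         suggestions.append("Use ** for exponentiation instead of ^")
--     if n_open != n_close:
--         suggestions.append("Check parentheses balance")
--     if has_double:
--         suggestions.append("Check for double operators")
--     return suggestions
-- ===== Notes on version B (the rewrite author's own statement) =====
-- stated objective: alternative
-- what changed: Replaces A's seven separate scans of the expression (membership tests, two any() generators, two count() calls, four substring searches) with one single pass that maintains char-class flags, open/close parenthesis counters and a repeated-operator flag from the previous character, then emits the same suggestions in the same order; it trades C-speed built-in scans for a single interpreted loop.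
import Mathlib
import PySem

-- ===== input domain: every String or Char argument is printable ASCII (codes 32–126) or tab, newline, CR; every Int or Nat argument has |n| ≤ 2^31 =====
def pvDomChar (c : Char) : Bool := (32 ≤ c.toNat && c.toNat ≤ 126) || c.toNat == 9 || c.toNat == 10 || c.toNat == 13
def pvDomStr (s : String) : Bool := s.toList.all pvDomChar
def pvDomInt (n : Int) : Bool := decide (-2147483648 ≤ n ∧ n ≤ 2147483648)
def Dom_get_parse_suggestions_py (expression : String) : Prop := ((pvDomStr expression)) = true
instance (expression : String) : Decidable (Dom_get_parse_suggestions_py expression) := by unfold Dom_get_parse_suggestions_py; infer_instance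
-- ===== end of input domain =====

-- B replaces A's seven separate scans of the expression with one single pass
-- maintaining flags/counters, emitting the same suggestions in the same order (objective: alternative).


-- ===== PORT A =====
-- c.isdigit() / c.isalpha() are ported as Char.isDigit / Char.isAlpha, exact on the ASCII domain.
def get_parse_suggestions_py (expression : String) : List String :=
  let suggestions : List String := []
  let suggestions :=
    if !(PySem.Str.isIn "*" expression) && expression.toList.any (fun c => c.isDigit)
        && expression.toList.any (fun c => c.isAlpha) then
      suggestions ++ ["Use * for multiplication (e.g., 2*x instead of 2x)"]
    else suggestions
  let suggestions :=
    if PySem.Str.isIn "^" expression then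
      suggestions ++ ["Use ** for exponentiation instead of ^"]
    else suggestions
  let suggestions :=
    if PySem.Str.count expression "(" ≠ PySem.Str.count expression ")" then
      suggestions ++ ["Check parentheses balance"]
    else suggestions
  let suggestions :=
    if (["++", "--", "**", "//"].any (fun op => PySem.Str.isIn op expression)) then
      suggestions ++ ["Check for double operators"]
    else suggestions
  suggestions

-- ===== PORT B =====
-- Single-pass state: flags, parenthesis counters, and the previous character.
structure PvScanSt where
  hasDigit : Bool
  hasAlpha : Bool
  hasStar : Bool
  hasCaret : Bool
  nOpen : Nat
  nClose : Nat
  hasDouble : Bool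
  prev : Option Char
  deriving Repr, DecidableEq

def pvScanStep (st : PvScanSt) (c : Char) : PvScanSt :=
  { hasDigit := st.hasDigit || c.isDigit
    hasAlpha := st.hasAlpha || c.isAlpha
    hasStar := st.hasStar || (c == '*')
    hasCaret := st.hasCaret || (c == '^')
    nOpen := if c = '(' then st.nOpen + 1 else st.nOpen
    nClose := if c = ')' then st.nClose + 1 else st.nClose
    hasDouble := st.hasDouble || (st.prev == some c && (c ∈ ['+', '-', '*', '/'] : Bool))
    prev := some c }

def pvScanInit : PvScanSt :=
  { hasDigit := false, hasAlpha := false, hasStar := false, hasCaret := false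
    nOpen := 0, nClose := 0, hasDouble := false, prev := none }

def get_parse_suggestions_py_alt (expression : String) : List String :=
  let st := expression.toList.foldl pvScanStep pvScanInit
  let s1 : List String :=
    if !st.hasStar && st.hasDigit && st.hasAlpha then
      ["Use * for multiplication (e.g., 2*x instead of 2x)"]
    else []
  let s2 : List String :=
    if st.hasCaret then ["Use ** for exponentiation instead of ^"] else []
  let s3 : List String :=
    if st.nOpen ≠ st.nClose then ["Check parentheses balance"] else []
  let s4 : List String :=
    if st.hasDouble then ["Check for double operators"] else []
  s1 ++ s2 ++ s3 ++ s4

-- ===== PRECONDITION & SPEC =====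
def Spec_get_parse_suggestions_py (expression : String) (out : List String) : Prop := out = get_parse_suggestions_py_alt expression
instance (expression : String) (out : List String) : Decidable (Spec_get_parse_suggestions_py expression out) := by unfold Spec_get_parse_suggestions_py; infer_instance

-- ===== CLAIM (what is proved, stated in full; the proofs are below) =====
def Claim_equal_get_parse_suggestions_py : Prop := ∀ (expression : String), Dom_get_parse_suggestions_py expression → Spec_get_parse_suggestions_py expression (get_parse_suggestions_py expression)

-- ===== LEMMAS AND PROOFS =====

-- adjacent-repeat scan used only in the proofs
def pvDbl : Option Char → List Char → Bool
  | _, [] => false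
  | p, c :: t => (p == some c && (c ∈ ['+', '-', '*', '/'] : Bool)) || pvDbl (some c) t

theorem pvDbl_some (a : Char) (l : List Char) :
    pvDbl (some a) l = ((l.head? == some a && (a ∈ ['+', '-', '*', '/'] : Bool)) || pvDbl none l) := by
  cases l with
  | nil => simp [pvDbl]
  | cons c t =>
    simp only [pvDbl, List.head?]
    by_cases h : a = c
    · subst h; simp
    · have h1 : (a == c) = false := by simp [h]
      have h2 : (c == a) = false := by simp [Ne.symm h]
      simp [h1, h2]

-- pvDbl from a fresh previous character finds exactly the doubled-operator substrings
theorem pvDbl_iff (l : List Char) :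
    pvDbl none l = true ↔ ∃ c ∈ (['+', '-', '*', '/'] : List Char), [c, c] <:+: l := by
  induction l with
  | nil => simp [pvDbl]
  | cons x t ih =>
    rw [show pvDbl none (x :: t) = pvDbl (some x) t from by simp [pvDbl], pvDbl_some]
    simp only [Bool.or_eq_true, ih]
    constructor
    · rintro (h | ⟨c, hc, hinf⟩)
      · rw [Bool.and_eq_true, beq_iff_eq] at h
        obtain ⟨hh, hm⟩ := h
        refine ⟨x, by simpa using hm, ?_⟩
        cases t with
        | nil => simp at hh
        | cons y s =>
          simp only [List.head?, Option.some.injEq] at hh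
          subst hh
          exact ⟨[], s, by simp⟩
      · exact ⟨c, hc, hinf.trans (List.suffix_cons x t).isInfix⟩
    · rintro ⟨c, hc, hinf⟩
      rcases (List.infix_cons_iff).1 hinf with hpre | hinf'
      · rcases hpre with ⟨r, hr⟩
        cases t with
        | nil => simp at hr
        | cons y s =>
          simp only [List.cons_append, List.cons.injEq] at hr
          obtain ⟨h1, h2, _⟩ := hr
          subst h1; subst h2
          left
          rw [Bool.and_eq_true, beq_iff_eq]
          exact ⟨rfl, by simpa using hc⟩
      · exact Or.inr ⟨c, hc, hinf'⟩

-- Python's s.count(c) for a single character is List.count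
theorem pv_count_go_single (c : Char) (l : List Char) (acc fuel : Nat) (h : l.length ≤ fuel) :
    PySem.Chars.count.go [c] fuel l acc = acc + l.count c := by
  induction l generalizing acc fuel with
  | nil => cases fuel <;> simp [PySem.Chars.count.go]
  | cons x t ih =>
    cases fuel with
    | zero => simp at h
    | succ f =>
      simp only [PySem.Chars.count.go]
      by_cases hx : x = c
      · subst hx
        simp [List.isPrefixOf, ih _ _ (by simpa using h)]
        omega
      · simp [List.isPrefixOf, hx, Ne.symm hx, ih _ _ (by simpa using h)]

theorem pv_count_single (l : List Char) (c : Char) : PySem.Chars.count l [c] = l.count c := by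
  simp [PySem.Chars.count, pv_count_go_single c l 0 l.length le_rfl]

-- characterisation of B's single-pass fold state
theorem pvScan_foldl (l : List Char) (st : PvScanSt) :
    l.foldl pvScanStep st =
      { hasDigit := st.hasDigit || l.any (fun c => c.isDigit)
        hasAlpha := st.hasAlpha || l.any (fun c => c.isAlpha)
        hasStar := st.hasStar || l.any (fun c => c == '*')
        hasCaret := st.hasCaret || l.any (fun c => c == '^')
        nOpen := st.nOpen + l.count '('
        nClose := st.nClose + l.count ')'
        hasDouble := st.hasDouble || pvDbl st.prev l
        prev := if l.isEmpty then st.prev else l.getLast? } := by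
  induction l generalizing st with
  | nil => simp [pvDbl]
  | cons x t ih =>
    rw [List.foldl_cons, ih]
    simp only [pvScanStep, pvDbl, PvScanSt.mk.injEq, List.any_cons, Bool.or_assoc,
      List.count_cons, List.isEmpty_cons]
    refine ⟨trivial, trivial, trivial, trivial, ?_, ?_, trivial, ?_⟩
    · split_ifs with h <;> rcases h' : (x == '(') with _ | _ <;>
        simp_all [beq_iff_eq] <;> omega
    · split_ifs with h <;> rcases h' : (x == ')') with _ | _ <;>
        simp_all [beq_iff_eq] <;> omega
    · cases t <;> simp

-- A's membership test for a single character equals B's scanned flag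
theorem pv_isIn_single (e : String) (c : Char) (s : String) (hc : s.toList = [c]) :
    PySem.Str.isIn s e = e.toList.any (fun x => x == c) := by
  rw [Bool.eq_iff_iff, PySem.Str.isIn_iff_infix, hc, List.singleton_infix_iff]
  simp

-- A's four substring tests together equal B's doubled-operator flag
theorem pv_ops_eq (e : String) :
    (["++", "--", "**", "//"].any (fun op => PySem.Str.isIn op e)) = pvDbl none e.toList := by
  rw [Bool.eq_iff_iff, pvDbl_iff]
  simp only [List.any_eq_true, PySem.Str.isIn_iff_infix]
  constructor
  · rintro ⟨op, hop, hinf⟩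
    fin_cases hop
    · exact ⟨'+', by simp, by simpa using hinf⟩
    · exact ⟨'-', by simp, by simpa using hinf⟩
    · exact ⟨'*', by simp, by simpa using hinf⟩
    · exact ⟨'/', by simp, by simpa using hinf⟩
  · rintro ⟨c, hc, hinf⟩
    fin_cases hc
    · exact ⟨"++", by simp, by simpa using hinf⟩
    · exact ⟨"--", by simp, by simpa using hinf⟩
    · exact ⟨"**", by simp, by simpa using hinf⟩
    · exact ⟨"//", by simp, by simpa using hinf⟩

-- the two ports agree on every string
theorem pv_main (e : String) :
    get_parse_suggestions_py e = get_parse_suggestions_py_alt e := by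
  unfold get_parse_suggestions_py get_parse_suggestions_py_alt
  rw [pvScan_foldl]
  simp only [pvScanInit, Bool.false_or, Nat.zero_add]
  rw [pv_isIn_single e '*' "*" (by decide), pv_isIn_single e '^' "^" (by decide), pv_ops_eq]
  simp only [PySem.Str.count, show "(".toList = ['('] from by decide,
    show ")".toList = [')'] from by decide, pv_count_single]
  split_ifs <;> simp_all

-- ===== VERDICT (by name: the statement is the Claim_ definition above) =====
theorem get_parse_suggestions_py_spec : Claim_equal_get_parse_suggestions_py := by
  intro e _
  unfold Spec_get_parse_suggestions_py
  exact pv_main e
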